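-- pv_equiv track=rewrite | github.com/sanjay51318/Final_BenchSync | mcp_servers/professional_resume_analyzer_server_jsonrpc.py | _categorize_skills
-- ===== SOURCE A (Python) =====
-- from typing import Any, Dict, List, Optional
--
-- def _categorize_skills(skills: List[str]) -> Dict[str, List[str]]:
--     """Categorize skills into groups"""
--     categories = {
--         'Programming Languages': [],
--         'Frameworks': [],
--         'Databases': [],
--         'DevOps & Cloud': [],
--         'Frontend Technologies': [],
--         'AI & ML': [],
--         'Other Technologies': []
--     }
--
--     for skill in skills:
--         skill_lower = skill.lower()
--
--         if skill_lower in ['python', 'java', 'javascript', 'typescript', 'php', 'c++', 'c#', 'ruby', 'go', 'rust']: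
--             categories['Programming Languages'].append(skill)
--         elif skill_lower in ['react', 'angular', 'vue.js', 'django', 'flask', 'spring boot', 'express.js', 'fastapi']:
--             categories['Frameworks'].append(skill)
--         elif skill_lower in ['sql', 'postgresql', 'mysql', 'mongodb', 'redis', 'elasticsearch']:
--             categories['Databases'].append(skill)
--         elif skill_lower in ['aws', 'azure', 'gcp', 'docker', 'kubernetes', 'jenkins', 'terraform', 'ansible']:
--             categories['DevOps & Cloud'].append(skill)
--         elif skill_lower in ['html', 'css', 'scss', 'bootstrap', 'tailwind']:
--             categories['Frontend Technologies'].append(skill)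
--         elif skill_lower in ['machine learning', 'ai', 'tensorflow', 'pytorch', 'scikit-learn']:
--             categories['AI & ML'].append(skill)
--         else:
--             categories['Other Technologies'].append(skill)
--
--     # Remove empty categories
--     return {k: v for k, v in categories.items() if v}
-- ===== SOURCE B (Python) =====
-- from typing import Any, Dict, List, Optional
--
-- _BUCKETS = [
--     ('Programming Languages', ['python', 'java', 'javascript', 'typescript', 'php', 'c++', 'c#', 'ruby', 'go', 'rust']),
--     ('Frameworks', ['react', 'angular', 'vue.js', 'django', 'flask', 'spring boot', 'express.js', 'fastapi']),
--     ('Databases', ['sql', 'postgresql', 'mysql', 'mongodb', 'redis', 'elasticsearch']),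
--     ('DevOps & Cloud', ['aws', 'azure', 'gcp', 'docker', 'kubernetes', 'jenkins', 'terraform', 'ansible']),
--     ('Frontend Technologies', ['html', 'css', 'scss', 'bootstrap', 'tailwind']),
--     ('AI & ML', ['machine learning', 'ai', 'tensorflow', 'pytorch', 'scikit-learn']),
-- ]
--
-- _CATEGORIES = [name for name, _ in _BUCKETS] + ['Other Technologies']
--
-- _LOOKUP = {s: name for name, bucket in _BUCKETS for s in bucket}
--
-- def _categorize_skills(skills: List[str]) -> Dict[str, List[str]]:
--     """Categorize skills into groups (flat lookup table instead of an elif ladder)."""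
--     result = {
--         cat: [s for s in skills if _LOOKUP.get(s.lower(), 'Other Technologies') == cat]
--         for cat in _CATEGORIES
--     }
--     return {k: v for k, v in result.items() if v}
-- ===== Notes on version B (the rewrite author's own statement) =====
-- stated objective: idiomatic
-- what changed: Replaces the seven-way elif ladder with one flat dict inverting the buckets, then builds each category's list by a per-category comprehension over the skills.
import Mathlib
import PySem

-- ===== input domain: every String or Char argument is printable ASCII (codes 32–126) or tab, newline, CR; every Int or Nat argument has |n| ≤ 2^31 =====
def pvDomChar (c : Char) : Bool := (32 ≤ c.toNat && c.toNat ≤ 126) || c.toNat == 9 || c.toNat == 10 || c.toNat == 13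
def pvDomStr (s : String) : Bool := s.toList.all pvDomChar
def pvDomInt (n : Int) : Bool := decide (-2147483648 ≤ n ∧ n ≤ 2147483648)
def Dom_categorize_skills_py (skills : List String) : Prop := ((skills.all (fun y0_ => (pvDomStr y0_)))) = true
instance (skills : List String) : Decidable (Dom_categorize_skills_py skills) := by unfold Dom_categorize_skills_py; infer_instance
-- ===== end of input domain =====

-- B replaces A's seven-way elif ladder with one flat skill→category dictionary and a
-- per-category comprehension (idiomatic; same O(n) cost, same return value).

-- ===== PORT A =====
def categorize_skills_py (skills : List String) : List (String × List String) :=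
  let categories : PySem.Dict String (List String) := PySem.Dict.ofList
    [("Programming Languages", []), ("Frameworks", []), ("Databases", []),
     ("DevOps & Cloud", []), ("Frontend Technologies", []), ("AI & ML", []),
     ("Other Technologies", [])]
  let categories := skills.foldl (fun cats skill =>
    let skill_lower := PySem.Str.lower skill
    if skill_lower ∈ ["python", "java", "javascript", "typescript", "php", "c++", "c#", "ruby", "go", "rust"] then
      cats.modify "Programming Languages" [] (· ++ [skill])
    else if skill_lower ∈ ["react", "angular", "vue.js", "django", "flask", "spring boot", "express.js", "fastapi"] then
      cats.modify "Frameworks" [] (· ++ [skill])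
    else if skill_lower ∈ ["sql", "postgresql", "mysql", "mongodb", "redis", "elasticsearch"] then
      cats.modify "Databases" [] (· ++ [skill])
    else if skill_lower ∈ ["aws", "azure", "gcp", "docker", "kubernetes", "jenkins", "terraform", "ansible"] then
      cats.modify "DevOps & Cloud" [] (· ++ [skill])
    else if skill_lower ∈ ["html", "css", "scss", "bootstrap", "tailwind"] then
      cats.modify "Frontend Technologies" [] (· ++ [skill])
    else if skill_lower ∈ ["machine learning", "ai", "tensorflow", "pytorch", "scikit-learn"] then
      cats.modify "AI & ML" [] (· ++ [skill])
    else
      cats.modify "Other Technologies" [] (· ++ [skill])) categories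
  categories.items.filter (fun kv => !kv.2.isEmpty)

-- ===== PORT B =====
def pvBuckets : List (String × List String) :=
  [("Programming Languages", ["python", "java", "javascript", "typescript", "php", "c++", "c#", "ruby", "go", "rust"]),
   ("Frameworks", ["react", "angular", "vue.js", "django", "flask", "spring boot", "express.js", "fastapi"]),
   ("Databases", ["sql", "postgresql", "mysql", "mongodb", "redis", "elasticsearch"]),
   ("DevOps & Cloud", ["aws", "azure", "gcp", "docker", "kubernetes", "jenkins", "terraform", "ansible"]),
   ("Frontend Technologies", ["html", "css", "scss", "bootstrap", "tailwind"]),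
   ("AI & ML", ["machine learning", "ai", "tensorflow", "pytorch", "scikit-learn"])]

def pvCategories : List String := pvBuckets.map (·.1) ++ ["Other Technologies"]

def pvLookup : PySem.Dict String String :=
  PySem.Dict.ofList (pvBuckets.flatMap (fun b => b.2.map (fun s => (s, b.1))))

def categorize_skills_py_alt (skills : List String) : List (String × List String) :=
  (pvCategories.map (fun cat =>
      (cat, skills.filter (fun s => pvLookup.getD (PySem.Str.lower s) "Other Technologies" == cat)))).filter
    (fun kv => !kv.2.isEmpty)

-- ===== PRECONDITION & SPEC =====
def Spec_categorize_skills_py (skills : List String) (out : List (String × List String)) : Prop := out = categorize_skills_py_alt skills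
instance (skills : List String) (out : List (String × List String)) : Decidable (Spec_categorize_skills_py skills out) := by unfold Spec_categorize_skills_py; infer_instance

-- ===== CLAIM (what is proved, stated in full; the proofs are below) =====
def Claim_equal_categorize_skills_py : Prop := ∀ (skills : List String), Dom_categorize_skills_py skills → Spec_categorize_skills_py skills (categorize_skills_py skills)

-- ===== LEMMAS AND PROOFS =====

-- the category A's elif ladder assigns to an (already lowered) string
def pvCatOf (t : String) : String :=
  if t ∈ ["python", "java", "javascript", "typescript", "php", "c++", "c#", "ruby", "go", "rust"] then "Programming Languages"
  else if t ∈ ["react", "angular", "vue.js", "django", "flask", "spring boot", "express.js", "fastapi"] then "Frameworks"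
  else if t ∈ ["sql", "postgresql", "mysql", "mongodb", "redis", "elasticsearch"] then "Databases"
  else if t ∈ ["aws", "azure", "gcp", "docker", "kubernetes", "jenkins", "terraform", "ansible"] then "DevOps & Cloud"
  else if t ∈ ["html", "css", "scss", "bootstrap", "tailwind"] then "Frontend Technologies"
  else if t ∈ ["machine learning", "ai", "tensorflow", "pytorch", "scikit-learn"] then "AI & ML"
  else "Other Technologies"

def pvKey (s : String) : String := pvCatOf (PySem.Str.lower s)

def pvNames : List String :=
  ["Programming Languages", "Frameworks", "Databases", "DevOps & Cloud",
   "Frontend Technologies", "AI & ML", "Other Technologies"]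

def pvSeed : PySem.Dict String (List String) := PySem.Dict.ofList
  [("Programming Languages", []), ("Frameworks", []), ("Databases", []),
   ("DevOps & Cloud", []), ("Frontend Technologies", []), ("AI & ML", []),
   ("Other Technologies", [])]


theorem pvCatOf_mem (t : String) : pvCatOf t ∈ pvNames := by
  unfold pvCatOf pvNames; split_ifs <;> simp

-- get? of a dict built from pairs with distinct keys is the first matching pair
theorem pv_get?_ofList_of_nodup {v : Type} (ps : List (String × v)) (t : String)
    (h : (ps.map (fun p => p.1)).Nodup) :
    (PySem.Dict.ofList ps).get? t = (ps.find? (fun p => p.1 == t)).map (fun p => p.2) := by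
  induction ps using List.reverseRecOn with
  | nil => rfl
  | append_singleton ps p ih =>
    have hins : PySem.Dict.ofList (ps ++ [p]) = (PySem.Dict.ofList ps).insert p.1 p.2 := by
      simp [PySem.Dict.ofList, PySem.Dict.update, List.foldl_append]
    rw [hins, PySem.Dict.get?_insert, List.find?_append]
    rw [List.map_append] at h
    have hfresh : p.1 ∉ ps.map (fun q => q.1) := by
      have := (List.nodup_append).1 h
      simpa using this.2.2 p.1
    by_cases ht : t = p.1
    · subst ht
      have hnone : ps.find? (fun q => q.1 == p.1) = none := by
        rw [List.find?_eq_none]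
        intro q hq
        simp only [beq_iff_eq]
        exact fun he => hfresh (he ▸ List.mem_map_of_mem hq)
      simp [hnone]
    · have hne : (p.1 == t) = false := by
        simp only [beq_eq_false_iff_ne]
        exact fun he => ht he.symm
      have h2 : List.find? (fun q => q.1 == t) [p] = none := by
        simp [hne]
      rw [h2, Option.or_none, if_neg ht, ih ((List.nodup_append).1 h).1]

-- first equality-match in a plain list
theorem pv_find?_beq (l : List String) (t : String) :
    l.find? (fun s => s == t) = if t ∈ l then some t else none := by
  induction l with
  | nil => simp
  | cons a l ih =>
    by_cases ha : a = t
    · subst ha; simp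
    · have hne : (a == t) = false := by
        simp only [beq_eq_false_iff_ne]; exact ha
      simp only [List.find?_cons, hne, ih, List.mem_cons]
      have : ¬ t = a := fun he => ha he.symm
      simp [this]

-- the inverted flat table, read back, is the bucket ladder
theorem pv_flat_eq_ladder (bs : List (String × List String)) (t : String) :
    (((bs.flatMap (fun b => b.2.map (fun s => (s, b.1)))).find?
        (fun p => p.1 == t)).map (fun p => p.2)).getD "Other Technologies"
      = bs.foldr (fun b acc => if t ∈ b.2 then b.1 else acc) "Other Technologies" := by
  induction bs with
  | nil => rfl
  | cons b bs ih =>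
    rw [List.flatMap_cons, List.find?_append, List.foldr_cons]
    have hmap : (b.2.map (fun s => (s, b.1))).find? (fun p => p.1 == t)
        = (b.2.find? (fun s => s == t)).map (fun s => (s, b.1)) := by
      rw [List.find?_map]; rfl
    rw [hmap, pv_find?_beq]
    by_cases hm : t ∈ b.2
    · simp [hm]
    · simp only [hm, if_false, Option.map_none, Option.none_or]
      exact ih

theorem pvKeys_nodup :
    ((pvBuckets.flatMap (fun b => b.2.map (fun s => (s, b.1)))).map (fun p => p.1)).Nodup := by
  simp [pvBuckets, List.nodup_cons]

theorem pvLookup_eq_catOf (t : String) :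
    pvLookup.getD t "Other Technologies" = pvCatOf t := by
  rw [PySem.Dict.getD_eq_get?_getD, pvLookup,
    pv_get?_ofList_of_nodup _ t pvKeys_nodup, pv_flat_eq_ladder]
  rfl

-- A's elif step IS "modify at the ladder's key"
theorem pvStep_eq : (fun (cats : PySem.Dict String (List String)) (skill : String) =>
    let skill_lower := PySem.Str.lower skill
    if skill_lower ∈ ["python", "java", "javascript", "typescript", "php", "c++", "c#", "ruby", "go", "rust"] then
      cats.modify "Programming Languages" [] (· ++ [skill])
    else if skill_lower ∈ ["react", "angular", "vue.js", "django", "flask", "spring boot", "express.js", "fastapi"] then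
      cats.modify "Frameworks" [] (· ++ [skill])
    else if skill_lower ∈ ["sql", "postgresql", "mysql", "mongodb", "redis", "elasticsearch"] then
      cats.modify "Databases" [] (· ++ [skill])
    else if skill_lower ∈ ["aws", "azure", "gcp", "docker", "kubernetes", "jenkins", "terraform", "ansible"] then
      cats.modify "DevOps & Cloud" [] (· ++ [skill])
    else if skill_lower ∈ ["html", "css", "scss", "bootstrap", "tailwind"] then
      cats.modify "Frontend Technologies" [] (· ++ [skill])
    else if skill_lower ∈ ["machine learning", "ai", "tensorflow", "pytorch", "scikit-learn"] then
      cats.modify "AI & ML" [] (· ++ [skill])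
    else
      cats.modify "Other Technologies" [] (· ++ [skill]))
    = fun cats skill => cats.modify (pvKey skill) [] (· ++ [skill]) := by
  funext cats skill
  unfold pvKey pvCatOf
  dsimp only
  split_ifs <;> rfl

theorem pvSeed_keys : pvSeed.keys = pvNames := by
  simp [pvSeed, pvNames, PySem.Dict.ofList, PySem.Dict.update, PySem.Dict.insert,
    PySem.Dict.contains, PySem.Dict.empty, PySem.Dict.keys]

theorem pvLoop_keys (skills : List String) :
    (skills.foldl (fun cats skill => cats.modify (pvKey skill) [] (· ++ [skill])) pvSeed).keys
      = pvNames := by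
  rw [PySem.Dict.keys_foldl_modify_key, PySem.Set.update_eq_append_filter]
  have h : (PySem.Set.ofList (skills.map pvKey)).filter
      (fun y => !(PySem.Set.contains pvSeed.keys y)) = [] := by
    rw [List.filter_eq_nil_iff]
    intro y hy
    obtain ⟨s, _, rfl⟩ := List.mem_map.1 ((PySem.Set.mem_ofList _ _).1 hy)
    have hm : pvKey s ∈ pvSeed.keys := by rw [pvSeed_keys]; exact pvCatOf_mem _
    simp only [Bool.not_eq_eq_eq_not, Bool.not_true, PySem.Set.contains_eq_listContains,
      List.contains_eq_mem, decide_eq_false_iff_not]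
    exact fun hc => hc hm
  rw [h, List.append_nil, pvSeed_keys]

theorem pvLoop_getD (skills : List String) (k : String) :
    (skills.foldl (fun cats skill => cats.modify (pvKey skill) [] (· ++ [skill])) pvSeed).getD k []
      = pvSeed.getD k [] ++ skills.filter (fun s => pvKey s == k) := by
  have hfold : skills.foldl (fun cats skill => cats.modify (pvKey skill) [] (· ++ [skill])) pvSeed
      = (skills.map (fun s => (pvKey s, s))).foldl (fun d p => d.modify p.1 [] (· ++ [p.2])) pvSeed := by
    rw [List.foldl_map]
  rw [hfold, PySem.Dict.getD_foldl_modify_append]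
  simp [List.filter_map, List.map_map, Function.comp_def]

theorem pvLoop_items (skills : List String) :
    (skills.foldl (fun cats skill => cats.modify (pvKey skill) [] (· ++ [skill])) pvSeed).items
      = pvNames.map (fun k => (k, skills.filter (fun s => pvKey s == k))) := by
  rw [PySem.Dict.items_eq_map_keys _ (by rw [pvLoop_keys]; decide) ([] : List String)]
  rw [pvLoop_keys]
  apply List.map_congr_left
  intro k hk
  rw [pvLoop_getD]
  have hseed : pvSeed.getD k [] = [] := by
    fin_cases hk <;>
      simp [pvSeed, PySem.Dict.getD, PySem.Dict.get?, PySem.Dict.ofList, PySem.Dict.update,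
        PySem.Dict.insert, PySem.Dict.contains, PySem.Dict.empty]
  rw [hseed, List.nil_append]

-- ===== VERDICT (by name: the statement is the Claim_ definition above) =====
theorem categorize_skills_py_spec : Claim_equal_categorize_skills_py := by
  intro skills _
  unfold Spec_categorize_skills_py categorize_skills_py categorize_skills_py_alt
  rw [pvStep_eq]
  simp only [show PySem.Dict.ofList
    [("Programming Languages", ([] : List String)), ("Frameworks", []), ("Databases", []),
     ("DevOps & Cloud", []), ("Frontend Technologies", []), ("AI & ML", []),
     ("Other Technologies", [])] = pvSeed from rfl, pvLoop_items, pvLookup_eq_catOf]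
  rw [show pvCategories = pvNames from rfl]
  simp only [pvKey]
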